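-- pv_equiv track=rewrite | github.com/leeiopd/algorithm | python/210923_programmers_무지의 먹방 라이브.py | solution
-- ===== SOURCE A (Python) =====
-- def solution(food_times, k):
--     sumFood_time = sum(food_times)
--     if sumFood_time <= k:
--         return -1
--
--     L = len(food_times)
--     hi = 100000000
--     lo = 0
--
--     while lo+1 < hi:
--         mid = (hi+lo)//2
--         time = mid * L
--         for f in food_times:
--             if f-mid < 0:
--                 time += f-mid
--
--         if time < k:
--             lo = mid
--         else:
--             hi = mid
--
--     time = lo * L
--     # time 초까지, lo 번 순회
--     for i in range(L):
--         food_times[i] -= lo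
--         if food_times[i] < 0:
--             time += food_times[i]
--
--     idx = 0
--     for i in range(k-time):
--         while food_times[idx] < 1:
--             idx = (idx+1) % L
--         food_times[idx] -= 1
--         idx = (idx+1) % L
--
--     while food_times[idx] < 1:
--         idx = (idx+1) % L
--     return idx+1
-- ===== SOURCE B (Python) =====
-- def solution(food_times, k):
--     # Returns the same value as the simulation-based version; computes the
--     # number of complete rounds by a sorted prefix-sum sweep and then plays
--     # out only the final partial round. Does not modify food_times.
--     if sum(food_times) <= k:
--         return -1
--
--     n = len(food_times)
--
--     # number of complete eating rounds before second k
--     rounds = 0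
--     s = 0
--     for j, t in enumerate(sorted(food_times)):
--         if rounds < t:
--             d = n - j                    # foods lasting at least t rounds
--             if s + t * d >= k:
--                 rounds = max(rounds, min(t - 1, (k - 1 - s) // d))
--                 break
--             rounds = t
--         s += t
--
--     remaining = [f - rounds for f in food_times]
--     left = k - rounds * n - sum(f for f in remaining if f < 0)
--
--     idx = 0
--     while True:
--         while remaining[idx] < 1:
--             idx = (idx + 1) % n
--         if left <= 0:
--             return idx + 1
--         remaining[idx] -= 1
--         idx = (idx + 1) % n
--         left -= 1
-- ===== Notes on version B (the rewrite author's own statement) =====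
-- stated objective: alternative
-- what changed: The number of complete rounds is computed exactly by one sorted prefix-sum sweep with a closed-form floor division instead of A's binary search over [0,1e8] (a full pass over the list per iteration), and only the final partial round is then simulated; B does not mutate food_times (equivalence is about the return value, as A mutates its argument in place).
import Mathlib
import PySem

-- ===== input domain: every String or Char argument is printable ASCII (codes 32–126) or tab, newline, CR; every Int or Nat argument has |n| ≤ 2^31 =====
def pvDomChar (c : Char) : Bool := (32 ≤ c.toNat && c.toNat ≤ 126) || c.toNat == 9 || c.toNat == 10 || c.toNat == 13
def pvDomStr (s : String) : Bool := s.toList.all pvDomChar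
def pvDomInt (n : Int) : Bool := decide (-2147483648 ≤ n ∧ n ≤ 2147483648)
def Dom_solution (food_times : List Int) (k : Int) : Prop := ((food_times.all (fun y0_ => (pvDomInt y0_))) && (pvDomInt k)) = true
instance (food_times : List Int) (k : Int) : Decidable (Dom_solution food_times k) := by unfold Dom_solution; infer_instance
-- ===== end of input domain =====

-- B computes the number of complete rounds exactly, by a sorted prefix-sum
-- sweep with one closed-form division, instead of A's binary search, and then
-- simulates only the final partial round; A mutates food_times in place and B
-- does not, so the equivalence proved here is about the RETURN value only.

-- ===== PORT A =====
-- inner 'for f in food_times: if f-mid < 0: time += f-mid' starting from mid*L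
def timeFor (foods : List Int) (mid : Int) : Int :=
  foods.foldl (fun time f => if f - mid < 0 then time + (f - mid) else time) (mid * (foods.length : Int))

-- 'while lo+1 < hi' binary search; the gap starts at 10^8 and halves each
-- iteration, so fuel 64 is never exhausted (proved in bsearchAux_char below)
def bsearchAux (foods : List Int) (k : Int) : Nat → Int → Int → Int
  | 0, lo, _ => lo
  | fuel+1, lo, hi =>
    if lo + 1 < hi then
      -- mid = (hi+lo)//2 (inlined)
      if timeFor foods (PySem.Int.floordiv (hi + lo) 2) < k then
        bsearchAux foods k fuel (PySem.Int.floordiv (hi + lo) 2) hi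
      else bsearchAux foods k fuel lo (PySem.Int.floordiv (hi + lo) 2)
    else lo

-- 'for i in range(L): food_times[i] -= lo; if food_times[i] < 0: time += food_times[i]'
def subLoop (lo : Int) : List Int → Int → List Int × Int
  | [], time => ([], time)
  | f :: rest, time =>
    let f' := f - lo
    let p := subLoop lo rest (if f' < 0 then time + f' else time)
    (f' :: p.1, p.2)

-- 'while food_times[idx] < 1: idx = (idx+1) % L' — this scan visits every
-- position within L steps, so fuel L suffices whenever some entry is ≥ 1;
-- otherwise Python never returns, and Pre_solution excludes that input.
-- (The identical while-loop appears verbatim in both A and B, so both ports use it.)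
def findEat (foods : List Int) (L : Nat) : Nat → Nat → Nat
  | 0, idx => idx
  | fuel+1, idx => if foods.getD idx 0 < 1 then findEat foods L fuel ((idx+1) % L) else idx

-- 'for i in range(k-time): <advance to eatable>; food_times[idx] -= 1; idx = (idx+1)%L'
def eatLoop (L : Nat) : Nat → List Int → Nat → Nat × List Int
  | 0, foods, idx => (idx, foods)
  | n+1, foods, idx =>
    let j := findEat foods L L idx
    eatLoop L n (foods.modify j (· - 1)) ((j+1) % L)

def solution (food_times : List Int) (k : Int) : Int :=
  if food_times.foldl (· + ·) 0 ≤ k then -1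
  else
    let L := food_times.length
    let lo := bsearchAux food_times k 64 0 100000000
    let p := subLoop lo food_times (lo * (L : Int))
    let q := eatLoop L (k - p.2).toNat p.1 0
    ((findEat q.2 L L q.1 : Int)) + 1

-- ===== PORT B =====
-- 'for j, t in enumerate(sorted(food_times))' with s the prefix sum and
-- d = n - j (= rest.length + 1) the number of foods still ≥ t; on break we
-- return the closed-form number of complete rounds
def walkAux (k : Int) : List Int → Int → Int → Int
  | [], lo, _ => lo
  | t :: rest, lo, s =>
    if lo < t then
      if k ≤ s + t * ((rest.length : Int) + 1) then
        max lo (min (t - 1) (PySem.Int.floordiv (k - 1 - s) ((rest.length : Int) + 1)))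
      else walkAux k rest t (s + t)
    else walkAux k rest lo (s + t)

-- B's 'while True' partial-round loop with early return
def eatB (L : Nat) (foods : List Int) (idx : Nat) (left : Int) : Int :=
  let j := findEat foods L L idx
  if left ≤ 0 then (j : Int) + 1
  else eatB L (foods.modify j (· - 1)) ((j+1) % L) (left - 1)
termination_by left.toNat
decreasing_by omega

def solution_alt (food_times : List Int) (k : Int) : Int :=
  if food_times.foldl (· + ·) 0 ≤ k then -1
  else
    let L := food_times.length
    let lo := walkAux k (PySem.List.sorted food_times (fun x => x) false) 0 0
    let remaining := food_times.map (fun f => f - lo)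
    let left := k - lo * (L : Int) - (remaining.filter (fun f => f < 0)).sum
    eatB L remaining 0 left

-- ===== PRECONDITION & SPEC =====
-- Pre_ excludes exactly the inputs on which Python A never returns: with
-- sum > k, an empty list raises IndexError at food_times[0], and a list with
-- no element ≥ 1 makes the 'while food_times[idx] < 1' scan loop forever.
def Pre_solution (food_times : List Int) (k : Int) : Prop :=
  food_times.foldl (· + ·) 0 ≤ k ∨ (food_times ≠ [] ∧ ∃ f ∈ food_times, 1 ≤ f)
instance (food_times : List Int) (k : Int) : Decidable (Pre_solution food_times k) := by unfold Pre_solution; infer_instance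

def pvWitness_solution : List Int × Int := ([3, 1, 2], 5)

def Spec_solution (food_times : List Int) (k : Int) (out : Int) : Prop := out = solution_alt food_times k
instance (food_times : List Int) (k : Int) (out : Int) : Decidable (Spec_solution food_times k out) := by unfold Spec_solution; infer_instance

-- ===== CLAIM (what is proved, stated in full; the proofs are below) =====
def Claim_equal_solution : Prop := ∀ (food_times : List Int) (k : Int), Dom_solution food_times k → Pre_solution food_times k → Spec_solution food_times k (solution food_times k)

-- ===== LEMMAS AND PROOFS =====

-- Σ min(f, m), the exact time elapsed after m complete rounds
def sumMin (xs : List Int) (m : Int) : Int := (xs.map (fun t => min t m)).sum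

-- A's binary search lands on a value with this property
def CharLo (foods : List Int) (k x : Int) : Prop :=
  0 ≤ x ∧ x ≤ 99999999 ∧ (x = 0 ∨ sumMin foods x < k) ∧ (x = 99999999 ∨ k ≤ sumMin foods (x + 1))

lemma sumMin_nil (m : Int) : sumMin [] m = 0 := rfl

lemma sumMin_cons (t : Int) (xs : List Int) (m : Int) :
    sumMin (t :: xs) m = min t m + sumMin xs m := by
  simp [sumMin]

lemma sumMin_mono (xs : List Int) {m m' : Int} (h : m ≤ m') :
    sumMin xs m ≤ sumMin xs m' := by
  induction xs with
  | nil => simp [sumMin_nil]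
  | cons t xs ih => rw [sumMin_cons, sumMin_cons]; have : min t m ≤ min t m' := by omega
                    omega

lemma sumMin_all_ge (xs : List Int) (m : Int) (h : ∀ x ∈ xs, m ≤ x) :
    sumMin xs m = m * (xs.length : Int) := by
  induction xs with
  | nil => simp [sumMin_nil]
  | cons t xs ih =>
      rw [sumMin_cons, ih (fun x hx => h x (List.mem_cons_of_mem _ hx))]
      have ht : m ≤ t := h t (List.mem_cons_self ..)
      have hmin : min t m = m := by omega
      rw [hmin]
      simp only [List.length_cons]
      push_cast
      ring

lemma sumMin_all_le (xs : List Int) (m : Int) (h : ∀ x ∈ xs, x ≤ m) :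
    sumMin xs m = xs.sum := by
  induction xs with
  | nil => simp [sumMin_nil]
  | cons t xs ih =>
      rw [sumMin_cons, ih (fun x hx => h x (List.mem_cons_of_mem _ hx))]
      have ht : t ≤ m := h t (List.mem_cons_self ..)
      have : min t m = t := by omega
      simp [this]

lemma sumMin_perm {xs ys : List Int} (h : xs.Perm ys) (m : Int) :
    sumMin xs m = sumMin ys m := by
  exact List.Perm.sum_eq (h.map _)

lemma timeFor_foldl (foods : List Int) (mid : Int) : ∀ acc : Int,
    foods.foldl (fun time f => if f - mid < 0 then time + (f - mid) else time) acc
      = acc + (foods.map (fun f => min (f - mid) 0)).sum := by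
  induction foods with
  | nil => intro acc; simp
  | cons t xs ih =>
      intro acc
      simp only [List.foldl_cons, List.map_cons, List.sum_cons, ih]
      have : (if t - mid < 0 then acc + (t - mid) else acc) = acc + min (t - mid) 0 := by
        split <;> omega
      omega

lemma timeFor_eq (foods : List Int) (mid : Int) : timeFor foods mid = sumMin foods mid := by
  unfold timeFor
  rw [timeFor_foldl]
  induction foods with
  | nil => simp [sumMin_nil]
  | cons t xs ih =>
      rw [sumMin_cons]
      simp only [List.map_cons, List.sum_cons, List.length_cons] at *
      have hcast : (((xs.length + 1 : Nat)) : Int) = (xs.length : Int) + 1 := by push_cast; ring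
      rw [hcast]
      have hexp : mid * ((xs.length : Int) + 1) = mid * (xs.length : Int) + mid := by ring
      have hmin : min t mid = mid + min (t - mid) 0 := by omega
      omega

-- lo·L + Σ min(f − lo, 0) = Σ min(f, lo): the elapsed time after lo rounds
lemma elapsed_eq (foods : List Int) (lo : Int) :
    lo * (foods.length : Int) + (foods.map (fun f => min (f - lo) 0)).sum = sumMin foods lo := by
  have h := timeFor_eq foods lo
  unfold timeFor at h
  rw [timeFor_foldl] at h
  exact h

lemma bsearchAux_char (foods : List Int) (k : Int) :
    ∀ (fuel : Nat) (lo hi : Int), 0 ≤ lo → lo < hi → hi ≤ 100000000 →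
      (lo = 0 ∨ sumMin foods lo < k) → (hi = 100000000 ∨ k ≤ sumMin foods hi) →
      hi - lo ≤ 2 ^ fuel →
      CharLo foods k (bsearchAux foods k fuel lo hi) := by
  intro fuel
  induction fuel with
  | zero =>
      intro lo hi h0 hlt hC h1 h2 hgap
      simp only [pow_zero] at hgap
      have hhi : hi = lo + 1 := by omega
      subst hhi
      simp only [bsearchAux]
      refine ⟨h0, by omega, h1, ?_⟩
      rcases h2 with h | h
      · left; omega
      · right; exact h
  | succ fuel ih =>
      intro lo hi h0 hlt hC h1 h2 hgap
      simp only [bsearchAux]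
      have hmid : PySem.Int.floordiv (hi + lo) 2 = (hi + lo) / 2 :=
        PySem.Int.floordiv_eq_ediv_of_pos (by omega)
      have hpow : (2:Int) ^ (fuel + 1) = 2 * 2 ^ fuel := by ring
      have hpos : (0:Int) < 2 ^ fuel := pow_pos (by norm_num) fuel
      rw [hpow] at hgap
      split
      · next hcond =>
          rw [timeFor_eq]
          split
          · next htime =>
              exact ih _ _ (by rw [hmid]; omega) (by rw [hmid]; omega) hC (Or.inr htime) h2
                (by rw [hmid]; omega)
          · next htime =>
              exact ih _ _ h0 (by rw [hmid]; omega) (by rw [hmid]; omega) h1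
                (Or.inr (by omega)) (by rw [hmid]; omega)
      · next hcond =>
          have hhi : hi = lo + 1 := by omega
          subst hhi
          refine ⟨h0, by omega, h1, ?_⟩
          rcases h2 with h | h
          · left; omega
          · right; exact h

lemma walkAux_char (k : Int) (F : Int → Int) :
    ∀ (suf : List Int) (lo s : Int),
      List.Pairwise (· ≤ ·) suf →
      0 ≤ lo →
      (lo = 0 ∨ F lo < k) →
      (∀ m, lo ≤ m → F m = s + sumMin suf m) →
      k < s + suf.sum →
      0 ≤ walkAux k suf lo s ∧ (walkAux k suf lo s = 0 ∨ F (walkAux k suf lo s) < k) ∧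
        k ≤ F (walkAux k suf lo s + 1) := by
  intro suf
  induction suf with
  | nil =>
      intro lo s _ h0 h1 hF hsum
      simp only [walkAux]
      refine ⟨h0, h1, ?_⟩
      rw [hF (lo + 1) (by omega), sumMin_nil]
      simp only [List.sum_nil] at hsum
      omega
  | cons t rest ih =>
      intro lo s hpw h0 h1 hF hsum
      have hall : ∀ x ∈ rest, t ≤ x := (List.pairwise_cons.mp hpw).1
      have hrest : List.Pairwise (· ≤ ·) rest := (List.pairwise_cons.mp hpw).2
      simp only [List.sum_cons] at hsum
      rw [walkAux]
      set d : Int := (rest.length : Int) + 1 with hd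
      have hdpos : 0 < d := by have := Int.natCast_nonneg rest.length; omega
      split
      · next hlo_t =>
          -- lo < t : on [lo, t] the elapsed time is the linear function s + m * d
          have hseg : ∀ m, lo ≤ m → m ≤ t → F m = s + m * d := by
            intro m hm1 hm2
            rw [hF m hm1, sumMin_all_ge (t :: rest) m ?_]
            · simp only [List.length_cons]; rw [hd]; push_cast; ring_nf
            · intro x hx
              rcases List.mem_cons.mp hx with rfl | hx'
              · exact hm2
              · exact le_trans hm2 (hall x hx')
          split
          · next hbreak =>
              -- k ≤ s + t * d : the answer lies in this segment
              set q : Int := PySem.Int.floordiv (k - 1 - s) d with hq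
              have hq1 : q * d ≤ k - 1 - s :=
                (PySem.Int.le_floordiv_iff_mul_le hdpos).mp (by omega)
              have hq2 : k - 1 - s < (q + 1) * d :=
                (PySem.Int.floordiv_lt_iff_lt_mul (q := q + 1) hdpos).mp (by omega)
              have hqt : q < t := by
                have h := (PySem.Int.floordiv_lt_iff_lt_mul (a := k - 1 - s) (q := t) hdpos).mpr (by omega)
                omega
              have hmin : min (t - 1) q = q := by omega
              rw [hmin]
              set w : Int := max lo q with hw
              have hwlo : lo ≤ w := le_max_left _ _
              have hwq : q ≤ w := le_max_right _ _
              have hwt : w ≤ t - 1 := by omega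
              refine ⟨by omega, ?_, ?_⟩
              · -- w = 0 ∨ F w < k
                by_cases hcase : lo ≤ q
                · have hwq' : w = q := by omega
                  right
                  rw [hwq', hseg q (by omega) (by omega)]
                  omega
                · have hwlo' : w = lo := by omega
                  rw [hwlo']
                  exact h1
              · -- k ≤ F (w + 1)
                rw [hseg (w + 1) (by omega) (by omega)]
                have hmul : (q + 1) * d ≤ (w + 1) * d :=
                  mul_le_mul_of_nonneg_right (by omega) (by omega)
                omega
          · next hcont =>
              -- s + t * d < k : food t is exhausted; absorb it into the prefix
              have hFt : F t = s + t * d := hseg t (by omega) (le_refl t)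
              refine ih t (s + t) hrest (by omega) (Or.inr (by omega)) ?_ (by omega)
              intro m hm
              rw [hF m (by omega), sumMin_cons]
              have : min t m = t := by omega
              omega
      · next hlo_t =>
          -- t ≤ lo : threshold already at or below lo; absorb t into the prefix
          refine ih lo (s + t) hrest h0 h1 ?_ (by omega)
          intro m hm
          rw [hF m hm, sumMin_cons]
          have : min t m = t := by omega
          omega

-- the exact (uncapped) round count computed by B's sweep
lemma walk_char (foods : List Int) (k : Int) (hk : k < foods.sum) :
    0 ≤ walkAux k (PySem.List.sorted foods (fun x => x) false) 0 0 ∧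
    (walkAux k (PySem.List.sorted foods (fun x => x) false) 0 0 = 0 ∨
      sumMin foods (walkAux k (PySem.List.sorted foods (fun x => x) false) 0 0) < k) ∧
    k ≤ sumMin foods (walkAux k (PySem.List.sorted foods (fun x => x) false) 0 0 + 1) := by
  set fs := PySem.List.sorted foods (fun x => x) false with hfs
  have hperm : fs.Perm foods := PySem.List.sorted_perm foods (fun x => x) false
  have hpw : List.Pairwise (· ≤ ·) fs := by
    have := PySem.List.sorted_pairwise (κ := Int) foods (fun x => x)
    simpa using this
  exact walkAux_char k (sumMin foods) fs 0 0 hpw (le_refl 0) (Or.inl rfl)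
    (fun m _ => by rw [sumMin_perm hperm m]; omega)
    (by rw [hperm.sum_eq]; omega)

-- phase 2: A's in-place subtraction loop, as a map plus a sum
lemma subLoop_eq (lo : Int) : ∀ (xs : List Int) (acc : Int),
    subLoop lo xs acc
      = (xs.map (fun f => f - lo),
         acc + ((xs.map (fun f => f - lo)).map (fun f => if f < 0 then f else 0)).sum) := by
  intro xs
  induction xs with
  | nil => intro acc; simp [subLoop]
  | cons t xs ih =>
      intro acc
      simp only [subLoop, ih, List.map_cons, List.sum_cons, Prod.mk.injEq, true_and]
      split <;> omega

lemma filter_neg_sum (xs : List Int) :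
    (xs.filter (fun f => decide (f < 0))).sum = (xs.map (fun f => if f < 0 then f else 0)).sum := by
  induction xs with
  | nil => rfl
  | cons t xs ih =>
      by_cases h : t < 0 <;> simp [h, ih]

lemma min_sub_zero (xs : List Int) (lo : Int) :
    (xs.map (fun f => f - lo)).map (fun f => if f < 0 then f else 0)
      = xs.map (fun f => min (f - lo) 0) := by
  rw [List.map_map]
  apply List.map_congr_left
  intro a _
  simp only [Function.comp_apply]
  split <;> omega

-- phase 3: B's single while-True loop equals A's counted loop plus final scan
lemma eat_bridge (L : Nat) : ∀ (n : Nat) (left : Int), left.toNat = n →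
    ∀ (foods : List Int) (idx : Nat),
      eatB L foods idx left
        = ((findEat (eatLoop L n foods idx).2 L L (eatLoop L n foods idx).1 : Int)) + 1 := by
  intro n
  induction n with
  | zero =>
      intro left hleft foods idx
      rw [eatB]
      have : left ≤ 0 := by omega
      simp only [if_pos this, eatLoop]
  | succ n ih =>
      intro left hleft foods idx
      rw [eatB]
      have hneg : ¬ left ≤ 0 := by omega
      simp only [if_neg hneg, eatLoop]
      exact ih (left - 1) (by omega) _ _

-- ============ round-invariance: eatB's answer does not depend on how many
-- complete rounds were skipped beforehand ============

-- decrement a food that is still eatable, leave exhausted ones alone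
def dec1 (f : Int) : Int := if 1 ≤ f then f - 1 else f

-- two food states are interchangeable for eatB: equal lengths and equal
-- values wherever either is still eatable
def StEq (f₁ f₂ : List Int) : Prop :=
  f₁.length = f₂.length ∧ ∀ j : Nat, (1 ≤ f₁.getD j 0 ∨ 1 ≤ f₂.getD j 0) → f₁.getD j 0 = f₂.getD j 0

lemma stEq_dead_iff {f₁ f₂ : List Int} (h : StEq f₁ f₂) (j : Nat) :
    f₁.getD j 0 < 1 ↔ f₂.getD j 0 < 1 := by
  constructor
  · intro h1; by_contra h2; have := h.2 j (Or.inr (by omega)); omega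
  · intro h1; by_contra h2; have := h.2 j (Or.inl (by omega)); omega

lemma findEat_stEq {f₁ f₂ : List Int} (h : StEq f₁ f₂) (L : Nat) :
    ∀ (fuel idx : Nat), findEat f₁ L fuel idx = findEat f₂ L fuel idx := by
  intro fuel
  induction fuel with
  | zero => intro idx; rfl
  | succ fuel ih =>
      intro idx
      simp only [findEat]
      by_cases hd : f₁.getD idx 0 < 1
      · rw [if_pos hd, if_pos ((stEq_dead_iff h idx).mp hd), ih]
      · rw [if_neg hd, if_neg (fun hc => hd ((stEq_dead_iff h idx).mpr hc))]

lemma stEq_modify {f₁ f₂ : List Int} (h : StEq f₁ f₂) (j : Nat) :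
    StEq (f₁.modify j (· - 1)) (f₂.modify j (· - 1)) := by
  have hmod : ∀ (f : List Int) (i : Nat), (f.modify j (· - 1)).getD i 0
      = if i = j ∧ i < f.length then f.getD i 0 - 1 else f.getD i 0 := by
    intro f i
    simp only [List.getD, List.getElem?_modify]
    rcases hsome : f[i]? with _ | v
    · have hge : ¬ i < f.length := by
        have := List.getElem?_eq_none_iff.mp hsome; omega
      simp [hge]
    · have hlt : i < f.length := by
        by_contra hc
        rw [List.getElem?_eq_none_iff.mpr (by omega)] at hsome
        cases hsome
      by_cases hij : i = j
      · subst hij; simp [hlt]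
      · simp [hij, Ne.symm hij]
  refine ⟨by simp [h.1], ?_⟩
  intro i hi
  rw [hmod, hmod] at hi ⊢
  by_cases hc : i = j ∧ i < f₁.length
  · have hc2 : i = j ∧ i < f₂.length := ⟨hc.1, by rw [← h.1]; exact hc.2⟩
    rw [if_pos hc, if_pos hc2] at hi ⊢
    have heq : f₁.getD i 0 = f₂.getD i 0 := h.2 i (by omega)
    omega
  · have hc2 : ¬ (i = j ∧ i < f₂.length) := by rw [← h.1]; exact hc
    rw [if_neg hc, if_neg hc2] at hi ⊢
    exact h.2 i hi

lemma eatB_stEq (L : Nat) : ∀ (n : Nat) (left : Int), left.toNat = n →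
    ∀ {f₁ f₂ : List Int}, StEq f₁ f₂ → ∀ (idx : Nat),
      eatB L f₁ idx left = eatB L f₂ idx left := by
  intro n
  induction n with
  | zero =>
      intro left hleft f₁ f₂ h idx
      conv_lhs => rw [eatB]
      conv_rhs => rw [eatB]
      have hl : left ≤ 0 := by omega
      simp only [if_pos hl, findEat_stEq h]
  | succ n ih =>
      intro left hleft f₁ f₂ h idx
      conv_lhs => rw [eatB]
      conv_rhs => rw [eatB]
      have hl : ¬ left ≤ 0 := by omega
      simp only [if_neg hl, findEat_stEq h]
      exact ih (left - 1) (by omega) (stEq_modify h _) _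

-- eatB depends on idx only through the first eatable position it finds
lemma eatB_idx (L : Nat) (foods : List Int) (i₁ i₂ : Nat) (left : Int)
    (h : findEat foods L L i₁ = findEat foods L L i₂) :
    eatB L foods i₁ left = eatB L foods i₂ left := by
  conv_lhs => rw [eatB]
  conv_rhs => rw [eatB]
  rw [h]

-- findEat reaches the first eatable position: if the d positions after idx
-- (cyclically) are dead and position idx+d is eatable, findEat returns it
lemma findEat_reach (foods : List Int) (L : Nat) :
    ∀ (d fuel idx : Nat), idx < L → d < fuel →
      (∀ e, e < d → foods.getD ((idx + e) % L) 0 < 1) →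
      1 ≤ foods.getD ((idx + d) % L) 0 →
      findEat foods L fuel idx = (idx + d) % L := by
  intro d
  induction d with
  | zero =>
      intro fuel idx hidx hfuel _ hpos
      obtain ⟨fuel', rfl⟩ : ∃ f', fuel = f' + 1 := ⟨fuel - 1, by omega⟩
      simp only [findEat, Nat.add_zero]
      simp only [Nat.add_zero] at hpos
      rw [Nat.mod_eq_of_lt hidx] at hpos ⊢
      rw [if_neg (by omega)]
  | succ d ih =>
      intro fuel idx hidx hfuel hdead hpos
      obtain ⟨fuel', rfl⟩ : ∃ f', fuel = f' + 1 := ⟨fuel - 1, by omega⟩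
      simp only [findEat]
      have h0 : foods.getD idx 0 < 1 := by
        have := hdead 0 (by omega)
        rwa [Nat.add_zero, Nat.mod_eq_of_lt hidx] at this
      rw [if_pos h0]
      have hL : 0 < L := by omega
      have hmodeq : ∀ e : Nat, ((idx + 1) % L + e) % L = (idx + (e + 1)) % L := by
        intro e
        rw [Nat.mod_add_mod, show idx + 1 + e = idx + (e + 1) by omega]
      rw [ih fuel' ((idx + 1) % L) (Nat.mod_lt _ hL) (by omega)
        (fun e he => by rw [hmodeq]; exact hdead (e + 1) (by omega))
        (by rw [hmodeq]; exact hpos)]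
      rw [hmodeq]

-- skipping a dead position does not change where findEat lands (fuel = L,
-- provided some position is eatable)
lemma findEat_skip (foods : List Int) (L idx : Nat)
    (hidx : idx < L) (hdead : foods.getD idx 0 < 1)
    (hpos : ∃ q, q < L ∧ 1 ≤ foods.getD q 0) :
    findEat foods L L idx = findEat foods L L ((idx + 1) % L) := by
  have hL : 0 < L := by omega
  obtain ⟨q, hqL, hq⟩ := hpos
  -- minimal cyclic distance from (idx+1)%L to an eatable position
  have hex : ∃ d : Nat, 1 ≤ foods.getD (((idx + 1) % L + d) % L) 0 := by
    refine ⟨(q + L - (idx + 1) % L), ?_⟩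
    have h1 : (idx + 1) % L < L := Nat.mod_lt _ hL
    have : ((idx + 1) % L + (q + L - (idx + 1) % L)) % L = q := by
      rw [show (idx + 1) % L + (q + L - (idx + 1) % L) = q + L by omega]
      rw [Nat.add_mod_right, Nat.mod_eq_of_lt hqL]
    rwa [this]
  classical
  set d₀ := Nat.find hex with hd₀
  have hd₀pos : 1 ≤ foods.getD (((idx + 1) % L + d₀) % L) 0 := Nat.find_spec hex
  have hd₀min : ∀ e, e < d₀ → foods.getD (((idx + 1) % L + e) % L) 0 < 1 := by
    intro e he
    have := Nat.find_min hex he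
    omega
  have hmodeq : ∀ e : Nat, ((idx + 1) % L + e) % L = (idx + (e + 1)) % L := by
    intro e
    rw [Nat.mod_add_mod, show idx + 1 + e = idx + (e + 1) by omega]
  -- d₀ ≤ L - 2: position idx itself (at distance L-1 from idx+1) is dead
  have hd₀lt : d₀ + 1 < L := by
    by_contra hc
    -- then d₀ ≥ L - 1; minimality forces d₀ ≤ distance of q, which is < L
    have hqdist : ∃ e, e < L ∧ 1 ≤ foods.getD (((idx + 1) % L + e) % L) 0 := by
      refine ⟨(q + L - (idx + 1) % L) % L, Nat.mod_lt _ hL, ?_⟩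
      have h1 : (idx + 1) % L < L := Nat.mod_lt _ hL
      have : ((idx + 1) % L + (q + L - (idx + 1) % L) % L) % L = q := by
        rw [Nat.add_mod_mod]
        rw [show (idx + 1) % L + (q + L - (idx + 1) % L) = q + L by omega]
        rw [Nat.add_mod_right, Nat.mod_eq_of_lt hqL]
      rwa [this]
    obtain ⟨e, heL, he⟩ := hqdist
    have hle : d₀ ≤ e := by
      by_contra hc2
      have := hd₀min e (by omega)
      omega
    -- so d₀ < L, hence d₀ = L - 1, whose position is idx — dead, contradiction
    have hd₀L : d₀ < L := by omega
    have : d₀ = L - 1 := by omega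
    have hpos_idx : ((idx + 1) % L + d₀) % L = idx := by
      rw [hmodeq, this, show idx + (L - 1 + 1) = idx + L by omega, Nat.add_mod_right,
        Nat.mod_eq_of_lt hidx]
    rw [hpos_idx] at hd₀pos
    omega
  rw [findEat_reach foods L d₀ L ((idx + 1) % L) (Nat.mod_lt _ hL) (by omega) hd₀min hd₀pos]
  rw [findEat_reach foods L (d₀ + 1) L idx hidx (by omega)
    (by
      intro e he
      match e with
      | 0 => rwa [Nat.add_zero, Nat.mod_eq_of_lt hidx]
      | e + 1 => rw [← hmodeq]; exact hd₀min e (by omega))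
    (by rw [← hmodeq]; exact hd₀pos)]
  rw [hmodeq]

-- a positive entry of the decremented state is positive in the original state
lemma pos_of_dec1_pos (pre suf : List Int) (q : Nat)
    (h : 1 ≤ (pre ++ suf.map dec1).getD q 0) :
    1 ≤ (pre ++ suf).getD q 0 := by
  by_cases hq : q < pre.length
  · rw [List.getD, List.getElem?_append_left hq] at h ⊢
    exact h
  · rw [List.getD, List.getElem?_append_right (by omega), List.getElem?_map] at h
    rw [List.getD, List.getElem?_append_right (by omega)]
    cases hsome : suf[q - pre.length]? with
    | none => rw [hsome] at h; simp at h
    | some v =>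
        rw [hsome] at h
        simp only [Option.map_some, Option.getD_some] at h
        simp only [Option.getD_some]
        unfold dec1 at h
        split at h <;> omega

-- modifying the element at the junction of an append
lemma modify_append_len (pre : List Int) (t : Int) (suf : List Int) (g : Int → Int) :
    (pre ++ t :: suf).modify pre.length g = pre ++ g t :: suf := by
  induction pre with
  | nil => rfl
  | cons p pre ih =>
      simp only [List.cons_append, List.length_cons, List.modify_succ_cons, ih]

lemma getD_append_len (pre : List Int) (t : Int) (suf : List Int) :
    (pre ++ t :: suf).getD pre.length 0 = t := by
  simp [List.getD]

-- ONE FULL ROUND: starting at position |pre| (positions before it already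
-- served this round), eatB serves every still-eatable food of suf once and
-- then behaves like the decremented state restarted at position 0
lemma round_gen (L : Nat) : ∀ (suf pre : List Int) (left : Int),
    pre.length + suf.length = L →
    ((suf.countP (fun f => decide (1 ≤ f)) : Int)) < left →
    (∃ q, q < L ∧ 1 ≤ (pre ++ suf.map dec1).getD q 0) →
    eatB L (pre ++ suf) (pre.length % L) left
      = eatB L (pre ++ suf.map dec1) 0 (left - (suf.countP (fun f => decide (1 ≤ f)) : Int)) := by
  intro suf
  induction suf with
  | nil =>
      intro pre left hlen _ _
      have hL : pre.length = L := by simpa using hlen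
      simp [Nat.mod_self, hL]
  | cons t rest ih =>
      intro pre left hlen hcnt hpos
      have hL : 0 < L := by simp at hlen; omega
      have hpreL : pre.length < L := by simp at hlen; omega
      have hidx : pre.length % L = pre.length := Nat.mod_eq_of_lt hpreL
      rw [hidx]
      have hposA : ∃ q, q < L ∧ 1 ≤ (pre ++ t :: rest).getD q 0 := by
        obtain ⟨q, hq, h⟩ := hpos
        exact ⟨q, hq, pos_of_dec1_pos pre (t :: rest) q h⟩
      by_cases ht : 1 ≤ t
      · -- position |pre| is eatable: eat it, then recurse with pre ++ [t-1]
        have hcount : (t :: rest).countP (fun f => decide (1 ≤ f))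
            = rest.countP (fun f => decide (1 ≤ f)) + 1 := by
          simp [List.countP_cons, ht]
        have hleftpos : ¬ left ≤ 0 := by rw [hcount] at hcnt; push_cast at hcnt; omega
        rw [eatB]
        have hfe : findEat (pre ++ t :: rest) L L pre.length = pre.length := by
          have := findEat_reach (pre ++ t :: rest) L 0 L pre.length hpreL hL
            (fun e he => absurd he (by omega))
            (by rw [Nat.add_zero, Nat.mod_eq_of_lt hpreL, getD_append_len]; omega)
          rwa [Nat.add_zero, Nat.mod_eq_of_lt hpreL] at this
        simp only [hfe, if_neg hleftpos]
        rw [modify_append_len]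
        have hsplit : pre ++ (t - 1) :: rest = (pre ++ [t - 1]) ++ rest := by simp
        have hlen' : (pre ++ [t - 1]).length = pre.length + 1 := by simp
        rw [hsplit, show (pre.length + 1) % L = (pre ++ [t - 1]).length % L by rw [hlen']]
        rw [ih (pre ++ [t - 1]) (left - 1) (by simp at hlen ⊢; omega)
          (by rw [hcount] at hcnt; push_cast at hcnt ⊢; omega)
          (by
            obtain ⟨q, hq, h⟩ := hpos
            refine ⟨q, hq, ?_⟩
            have : (pre ++ [t - 1]) ++ rest.map dec1 = pre ++ (t :: rest).map dec1 := by
              simp [dec1, ht]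
            rwa [this])]
        have : (pre ++ [t - 1]) ++ rest.map dec1 = pre ++ (t :: rest).map dec1 := by
          simp [dec1, ht]
        rw [this, hcount]
        push_cast
        ring_nf
      · -- position |pre| is dead: skip it, then recurse with pre ++ [t]
        have hdead : (pre ++ t :: rest).getD pre.length 0 < 1 := by
          rw [getD_append_len]; omega
        have hskip := findEat_skip (pre ++ t :: rest) L pre.length hpreL hdead hposA
        rw [eatB_idx L (pre ++ t :: rest) pre.length ((pre.length + 1) % L) left hskip]
        have hcount : (t :: rest).countP (fun f => decide (1 ≤ f))
            = rest.countP (fun f => decide (1 ≤ f)) := by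
          simp [List.countP_cons, ht]
        have hsplit : pre ++ t :: rest = (pre ++ [t]) ++ rest := by simp
        have hlen' : (pre ++ [t]).length = pre.length + 1 := by simp
        rw [hsplit, show (pre.length + 1) % L = (pre ++ [t]).length % L by rw [hlen']]
        rw [ih (pre ++ [t]) left (by simp at hlen ⊢; omega)
          (by rw [hcount] at hcnt; exact hcnt)
          (by
            obtain ⟨q, hq, h⟩ := hpos
            refine ⟨q, hq, ?_⟩
            have : (pre ++ [t]) ++ rest.map dec1 = pre ++ (t :: rest).map dec1 := by
              simp [dec1, ht]
            rwa [this])]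
        have : (pre ++ [t]) ++ rest.map dec1 = pre ++ (t :: rest).map dec1 := by
          simp [dec1, ht]
        rw [this, hcount]

-- the number of foods still eatable after lo rounds, as a sumMin difference
lemma countP_sumMin (foods : List Int) (lo : Int) :
    ((foods.map (fun f => f - lo)).countP (fun f => decide (1 ≤ f)) : Int)
      = sumMin foods (lo + 1) - sumMin foods lo := by
  induction foods with
  | nil => simp [sumMin_nil]
  | cons t xs ih =>
      rw [sumMin_cons, sumMin_cons]
      simp only [List.map_cons, List.countP_cons, decide_eq_true_eq]
      by_cases h : (1:Int) ≤ t - lo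
      · rw [if_pos h]
        push_cast
        omega
      · rw [if_neg h]
        push_cast
        omega

-- ONE ROUND ADVANCE on the original problem: skipping one more complete round
-- does not change eatB's answer
lemma advance (foods : List Int) (k lo : Int) (h0 : 0 ≤ lo)
    (hnext : sumMin foods (lo + 1) < k)
    (hbig : ∃ f ∈ foods, lo + 2 ≤ f) :
    eatB foods.length (foods.map (fun f => f - lo)) 0 (k - sumMin foods lo)
      = eatB foods.length (foods.map (fun f => f - (lo + 1))) 0 (k - sumMin foods (lo + 1)) := by
  set g : List Int := foods.map (fun f => f - lo) with hg
  set L : Nat := foods.length with hLdef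
  have hlen : g.length = L := by rw [hg, hLdef]; simp
  have hQ : ((g.countP (fun f => decide (1 ≤ f)) : Int)) = sumMin foods (lo + 1) - sumMin foods lo :=
    countP_sumMin foods lo
  -- a food with f ≥ lo+2 stays eatable even after the extra round
  have hpos : ∃ q, q < L ∧ 1 ≤ (([] : List Int) ++ g.map dec1).getD q 0 := by
    obtain ⟨f, hf, hf2⟩ := hbig
    obtain ⟨i, hi, hget⟩ := List.mem_iff_getElem.mp hf
    refine ⟨i, by omega, ?_⟩
    simp only [List.nil_append, List.getD, hg, List.map_map, List.getElem?_map,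
      List.getElem?_eq_getElem hi, hget, Option.map_some, Option.getD_some, Function.comp_apply]
    unfold dec1
    split <;> omega
  have hround := round_gen L g ([] : List Int) (k - sumMin foods lo)
    (by simp [hlen]) (by omega) hpos
  simp only [List.nil_append, List.length_nil, Nat.zero_mod] at hround
  rw [hround, hQ]
  have hst : StEq (g.map dec1) (foods.map (fun f => f - (lo + 1))) := by
    constructor
    · simp [hg]
    · intro j hj
      simp only [hg, List.map_map, List.getD, List.getElem?_map, Function.comp_apply]
      cases hsome : foods[j]? with
      | none => simp
      | some v =>
          simp only [Option.map_some, Option.getD_some]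
          simp only [hg, List.map_map, List.getD, List.getElem?_map, Function.comp_apply,
            hsome, Option.map_some, Option.getD_some] at hj
          by_cases hv : (1:Int) ≤ v - lo
          · simp only [dec1, Function.comp_apply, if_pos hv] at hj ⊢
            omega
          · simp only [dec1, Function.comp_apply, if_neg hv] at hj ⊢
            omega
  have harith : k - sumMin foods lo - (sumMin foods (lo + 1) - sumMin foods lo)
      = k - sumMin foods (lo + 1) := by ring
  rw [harith]
  exact eatB_stEq L (k - sumMin foods (lo + 1)).toNat _ rfl hst 0

-- chain the round advances from A's (possibly capped) round count up to B's
-- exact one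
lemma bridge (foods : List Int) (k : Int) : ∀ (n : Nat) (a b : Int),
    0 ≤ a → a ≤ b → (b - a).toNat = n →
    k < foods.sum →
    (∀ lo, a ≤ lo → lo < b → sumMin foods (lo + 1) < k) →
    eatB foods.length (foods.map (fun f => f - a)) 0 (k - sumMin foods a)
      = eatB foods.length (foods.map (fun f => f - b)) 0 (k - sumMin foods b) := by
  intro n
  induction n with
  | zero =>
      intro a b h0 hab hn _ _
      have : a = b := by omega
      subst this; rfl
  | succ n ih =>
      intro a b h0 hab hn hk hS
      have hlt : a < b := by omega
      have hnext : sumMin foods (a + 1) < k := hS a (le_refl a) hlt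
      have hbig : ∃ f ∈ foods, a + 2 ≤ f := by
        by_contra hc
        have hall : ∀ f ∈ foods, f ≤ a + 1 := by
          intro f hf
          by_contra h2
          exact hc ⟨f, hf, by omega⟩
        have : sumMin foods (a + 1) = foods.sum := sumMin_all_le foods (a + 1) hall
        omega
      rw [advance foods k a h0 hnext hbig]
      exact ih (a + 1) b (by omega) (by omega) (by omega) hk
        (fun lo h1 h2 => hS lo (by omega) h2)

-- ===== VERDICT (by name: the statement is the Claim_ definition above) =====
theorem solution_spec : Claim_equal_solution := by
  intro foods k _hdom _hpre
  unfold Spec_solution solution solution_alt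
  by_cases hs : foods.foldl (· + ·) 0 ≤ k
  · simp [hs]
  · simp only [if_neg hs]
    have hsum : k < foods.sum := by
      rw [List.sum_eq_foldl]; omega
    -- A's side as eatB at its round count a
    set a := bsearchAux foods k 64 0 100000000 with ha
    have hA : CharLo foods k a :=
      bsearchAux_char foods k 64 0 100000000 (le_refl 0) (by omega) (le_refl _)
        (Or.inl rfl) (Or.inl rfl) (by norm_num)
    -- B's side as eatB at its round count b
    set b := walkAux k (PySem.List.sorted foods (fun x => x) false) 0 0 with hb
    obtain ⟨hb0, hb1, hb2⟩ := walk_char foods k hsum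
    rw [← hb] at hb0 hb1 hb2
    obtain ⟨ha0, haC, ha1, _⟩ := hA
    -- a ≤ b
    have hab : a ≤ b := by
      rcases ha1 with h0a | hsm
      · omega
      · by_contra hc
        have : sumMin foods (b + 1) ≤ sumMin foods a := sumMin_mono foods (by omega)
        omega
    -- every intermediate advance is still strictly before second k
    have hS : ∀ lo, a ≤ lo → lo < b → sumMin foods (lo + 1) < k := by
      intro lo h1 h2
      have hbne : b ≠ 0 := by omega
      have hsb : sumMin foods b < k := hb1.resolve_left hbne
      have : sumMin foods (lo + 1) ≤ sumMin foods b := sumMin_mono foods (by omega)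
      omega
    -- rewrite A's tail into eatB form
    rw [subLoop_eq]
    simp only
    rw [← eat_bridge foods.length (k - (a * (foods.length:Int)
      + ((foods.map (fun f => f - a)).map (fun f => if f < 0 then f else 0)).sum)).toNat _ rfl]
    rw [min_sub_zero, elapsed_eq]
    -- rewrite B's tail into eatB form
    rw [filter_neg_sum, min_sub_zero]
    have hBleft : k - b * (foods.length : Int) - (foods.map (fun f => min (f - b) 0)).sum
        = k - sumMin foods b := by
      have := elapsed_eq foods b
      omega
    rw [hBleft]
    exact bridge foods k (b - a).toNat a b ha0 hab rfl hsum hS
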